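-- pv_equiv track=rewrite | github.com/smallf00t/02---CSTA | v-1.2-csta_monitor.py | _extract_ascii_number
-- ===== SOURCE A (Python) =====
-- def _extract_ascii_number(hex_data: str, start_idx: int, length: int = 10) -> str:
--     """
--     Extrait un numéro au format ASCII depuis des données hexadécimales
--
--     Args:
--         hex_data: Données hexadécimales
--         start_idx: Position de départ
--         length: Longueur maximale à extraire
--
--     Returns:
--         str: Numéro extrait
--     """
--     number = ""
--     for i in range(0, length * 3, 3):
--         if start_idx + i >= len(hex_data):
--             break
--         byte_hex = hex_data[start_idx + i:start_idx + i + 2]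
--         if byte_hex in ["30","31","32","33","34","35","36","37","38","39"]:
--             number += chr(int(byte_hex, 16))
--         else:
--             if len(number) > 0:
--                 break
--     return number
-- ===== SOURCE B (Python) =====
-- def _extract_ascii_number(hex_data: str, start_idx: int, length: int = 10) -> str:
--     """Build-then-scan: decode each sampled 2-char chunk to a digit or a space
--     sentinel, then the answer is the first whitespace-separated word."""
--     decode = {"30": "0", "31": "1", "32": "2", "33": "3", "34": "4",
--               "35": "5", "36": "6", "37": "7", "38": "8", "39": "9"}
--     n = len(hex_data)
--     chunks = [hex_data[start_idx + i:start_idx + i + 2]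
--               for i in range(0, min(length * 3, n - start_idx), 3)]
--     s = ''.join(decode.get(c, ' ') for c in chunks)
--     runs = s.split()
--     return runs[0] if runs else ''
-- ===== Notes on version B (the rewrite author's own statement) =====
-- stated objective: idiomatic
-- what changed: Replaces A's stateful skip/accumulate/break loop with a build-then-scan pipeline: a comprehension samples the 2-char chunks, a dict maps each to a digit or a space sentinel, and the result is the first whitespace-separated word of the joined string.
import Mathlib
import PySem

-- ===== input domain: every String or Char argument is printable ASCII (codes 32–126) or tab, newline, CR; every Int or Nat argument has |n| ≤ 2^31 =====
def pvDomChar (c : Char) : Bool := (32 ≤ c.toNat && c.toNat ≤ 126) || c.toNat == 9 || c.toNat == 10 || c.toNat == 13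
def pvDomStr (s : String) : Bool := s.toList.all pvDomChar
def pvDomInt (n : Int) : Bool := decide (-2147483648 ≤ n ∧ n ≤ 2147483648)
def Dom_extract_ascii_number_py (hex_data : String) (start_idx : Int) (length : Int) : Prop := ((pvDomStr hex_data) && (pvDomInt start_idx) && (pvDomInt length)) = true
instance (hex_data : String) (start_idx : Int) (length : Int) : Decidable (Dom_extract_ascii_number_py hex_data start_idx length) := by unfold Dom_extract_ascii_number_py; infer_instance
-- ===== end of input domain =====

-- B replaces A's stateful skip/accumulate/break loop by a build-then-scan pipeline
-- (decode sampled chunks to digits or a space sentinel, take the first word); same cost, more idiomatic.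

-- ===== PORT A =====
-- chr(int(bh, 16)); the `.getD 0` default is never used: A only evaluates this on the
-- ten two-hex-digit literals below, where int(bh, 16) succeeds. Char.ofNat is exact for chr here
-- (values are 48..57).
def pvAChr (bh : List Char) : Char :=
  Char.ofNat ((PySem.Int.ofCharsBase? bh 16).getD 0).toNat

def pvALoop (h : List Char) (si : Int) (stop : Int) (i : Int) (number : List Char) : List Char :=
  if hlt : i < stop then
    if (h.length : Int) ≤ si + i then number
    else
      let byte_hex := PySem.List.slice h (some (si + i)) (some (si + i + 2))
      if byte_hex ∈ [['3','0'],['3','1'],['3','2'],['3','3'],['3','4'],['3','5'],['3','6'],['3','7'],['3','8'],['3','9']] then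
        pvALoop h si stop (i + 3) (number ++ [pvAChr byte_hex])
      else if 0 < number.length then number
      else pvALoop h si stop (i + 3) number
  else number
termination_by (stop - i).toNat
decreasing_by all_goals omega

def extract_ascii_number_py (hex_data : String) (start_idx : Int) (length : Int) : String :=
  String.ofList (pvALoop hex_data.toList start_idx (length * 3) 0 [])

-- ===== PORT B =====
def pvDecode : PySem.Dict (List Char) Char :=
  PySem.Dict.ofList [(['3','0'],'0'),(['3','1'],'1'),(['3','2'],'2'),(['3','3'],'3'),(['3','4'],'4'),
                     (['3','5'],'5'),(['3','6'],'6'),(['3','7'],'7'),(['3','8'],'8'),(['3','9'],'9')]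

def extract_ascii_number_py_alt (hex_data : String) (start_idx : Int) (length : Int) : String :=
  let h := hex_data.toList
  let chunks := (PySem.List.pyRange 0 (min (length * 3) ((h.length : Int) - start_idx)) 3).map
      (fun i => PySem.List.slice h (some (start_idx + i)) (some (start_idx + i + 2)))
  let s := chunks.map (fun c => pvDecode.getD c ' ')
  let runs := PySem.Chars.split₀ s
  String.ofList (runs.headD [])

-- ===== PRECONDITION & SPEC =====
def Spec_extract_ascii_number_py (hex_data : String) (start_idx : Int) (length : Int) (out : String) : Prop := out = extract_ascii_number_py_alt hex_data start_idx length
instance (hex_data : String) (start_idx : Int) (length : Int) (out : String) : Decidable (Spec_extract_ascii_number_py hex_data start_idx length out) := by unfold Spec_extract_ascii_number_py; infer_instance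

-- ===== CLAIM (what is proved, stated in full; the proofs are below) =====
def Claim_equal_extract_ascii_number_py : Prop := ∀ (hex_data : String) (start_idx : Int) (length : Int), Dom_extract_ascii_number_py hex_data start_idx length → Spec_extract_ascii_number_py hex_data start_idx length (extract_ascii_number_py hex_data start_idx length)

-- ===== LEMMAS AND PROOFS =====

def pvCodes : List (List Char) :=
  [['3','0'],['3','1'],['3','2'],['3','3'],['3','4'],['3','5'],['3','6'],['3','7'],['3','8'],['3','9']]

-- list-form of A's loop, for the induction; bridged to pvALoop below
def pvALoopL (h : List Char) (si : Int) : List Int → List Char → List Char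
  | [], number => number
  | i :: rest, number =>
    if (h.length : Int) ≤ si + i then number
    else
      let byte_hex := PySem.List.slice h (some (si + i)) (some (si + i + 2))
      if byte_hex ∈ [['3','0'],['3','1'],['3','2'],['3','3'],['3','4'],['3','5'],['3','6'],['3','7'],['3','8'],['3','9']] then
        pvALoopL h si rest (number ++ [pvAChr byte_hex])
      else if 0 < number.length then number
      else pvALoopL h si rest number

theorem pv_pyRange3_nil (i stop : Int) (h : stop ≤ i) : PySem.List.pyRange i stop 3 = [] := by
  simp only [PySem.List.pyRange]
  norm_num
  intro hlt
  omega

theorem pv_pyRange3_cons (i stop : Int) (h : i < stop) :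
    PySem.List.pyRange i stop 3 = i :: PySem.List.pyRange (i + 3) stop 3 := by
  simp only [PySem.List.pyRange]
  norm_num
  rw [if_pos h]
  by_cases h3 : i + 3 < stop
  · rw [if_pos h3]
    have hc : ((stop - i + 3 - 1) / 3).toNat = ((stop - (i + 3) + 3 - 1) / 3).toNat + 1 := by omega
    rw [hc, List.range_succ_eq_map]
    simp only [List.map_cons, List.map_map]
    congr 1
    · norm_num
    · apply List.map_congr_left
      intro k _
      simp only [Function.comp]
      push_cast
      ring
  · rw [if_neg h3]
    have hc : ((stop - i + 3 - 1) / 3).toNat = 1 := by omega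
    rw [hc]
    simp

theorem pv_pvALoop_eq_L (h : List Char) (si : Int) (stop : Int) :
    ∀ (i : Int) (number : List Char),
      pvALoop h si stop i number = pvALoopL h si (PySem.List.pyRange i stop 3) number := by
  intro i
  induction hi : (stop - i).toNat using Nat.strong_induction_on generalizing i with
  | _ n ih =>
    intro number
    by_cases hlt : i < stop
    · have hrec := fun num => ih ((stop - (i + 3)).toNat) (by omega) (i + 3) rfl num
      rw [pv_pyRange3_cons i stop hlt, pvALoop, dif_pos hlt, pvALoopL]
      by_cases hge : (h.length : Int) ≤ si + i
      · rw [if_pos hge, if_pos hge]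
      · rw [if_neg hge, if_neg hge]
        set bh := PySem.List.slice h (some (si + i)) (some (si + i + 2)) with hbh
        by_cases hmem : bh ∈ [['3','0'],['3','1'],['3','2'],['3','3'],['3','4'],['3','5'],['3','6'],['3','7'],['3','8'],['3','9']]
        · rw [if_pos hmem, if_pos hmem]
          exact hrec _
        · rw [if_neg hmem, if_neg hmem]
          by_cases hnum : 0 < number.length
          · rw [if_pos hnum, if_pos hnum]
          · rw [if_neg hnum, if_neg hnum]
            exact hrec _
    · rw [pvALoop, dif_neg hlt, pv_pyRange3_nil i stop (by omega), pvALoopL]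

-- the comprehension's bound-cap equals A's in-loop cutoff: on an increasing stride-3 range,
-- filtering (si + j < n) is the same as capping the stop at n - si
theorem pv_filter_range (si K : Int) (M : Int) :
    ∀ (i : Int), (PySem.List.pyRange i M 3).filter (fun j => decide (si + j < si + K)) =
      PySem.List.pyRange i (min M K) 3 := by
  intro i
  induction hi : (M - i).toNat using Nat.strong_induction_on generalizing i with
  | _ n ih =>
    by_cases hM : i < M
    · rw [pv_pyRange3_cons i M hM, List.filter_cons]
      by_cases hK : i < K
      · rw [if_pos (by simp; omega), ih ((M - (i + 3)).toNat) (by omega) (i + 3) rfl,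
            pv_pyRange3_cons i (min M K) (by omega)]
      · rw [if_neg (by simp; omega)]
        have hnil : ∀ (l : List Int), (∀ j ∈ l, i ≤ j) →
            l.filter (fun j => decide (si + j < si + K)) = [] := by
          intro l hl
          apply List.filter_eq_nil_iff.mpr
          intro j hj
          have := hl j hj
          simp
          omega
        rw [hnil _ (fun j hj => by
          have : ∀ m, ∀ j ∈ PySem.List.pyRange m M 3, m ≤ j := by
            intro m j hj
            simp only [PySem.List.pyRange] at hj
            rw [if_neg (by norm_num)] at hj
            obtain ⟨k, _, rfl⟩ := List.mem_map.mp hj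
            omega
          have := this (i + 3) j hj
          omega)]
        rw [pv_pyRange3_nil i (min M K) (by omega)]
    · rw [pv_pyRange3_nil i M (by omega), pv_pyRange3_nil i (min M K) (by omega)]
      rfl

def pvMapped (h : List Char) (si : Int) (l : List Int) : List Char :=
  ((l.filter (fun i => decide (si + i < (h.length : Int)))).map
      (fun i => PySem.List.slice h (some (si + i)) (some (si + i + 2)))).map
    (fun c => pvDecode.getD c ' ')

theorem pv_go_nil (cur : List Char) (acc : List (List Char)) :
    PySem.Chars.split₀.go [] cur acc =
      (if cur.isEmpty then acc.reverse else (cur.reverse :: acc).reverse) := rfl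

theorem pv_go_cons (c : Char) (rest cur : List Char) (acc : List (List Char)) :
    PySem.Chars.split₀.go (c :: rest) cur acc =
      (if PySem.Chars.isspace c then
        (if cur.isEmpty then PySem.Chars.split₀.go rest [] acc
         else PySem.Chars.split₀.go rest [] (cur.reverse :: acc))
       else PySem.Chars.split₀.go rest (c :: cur) acc) := rfl

theorem pv_go_acc (s : List Char) : ∀ (cur : List Char) (acc : List (List Char)),
    PySem.Chars.split₀.go s cur acc = acc.reverse ++ PySem.Chars.split₀.go s cur [] := by
  induction s with
  | nil => intro cur acc; by_cases hc : cur.isEmpty <;> simp [pv_go_nil, hc]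
  | cons c rest ih =>
    intro cur acc
    by_cases hs : PySem.Chars.isspace c
    · by_cases hc : cur.isEmpty
      · rw [pv_go_cons, if_pos hs, if_pos hc, pv_go_cons, if_pos hs, if_pos hc, ih [] acc]
      · rw [pv_go_cons, if_pos hs, if_neg hc, pv_go_cons, if_pos hs, if_neg hc,
            ih [] (cur.reverse :: acc), ih [] [cur.reverse]]
        simp
    · rw [pv_go_cons, if_neg hs, pv_go_cons, if_neg hs, ih (c :: cur) acc]

theorem pv_go_word (s : List Char) : ∀ (cur : List Char), cur ≠ [] →
    (PySem.Chars.split₀.go s cur []).head? =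
      some (cur.reverse ++ s.takeWhile (fun c => !PySem.Chars.isspace c)) := by
  induction s with
  | nil => intro cur hc; simp [pv_go_nil, hc]
  | cons c rest ih =>
    intro cur hc
    by_cases hs : PySem.Chars.isspace c
    · rw [pv_go_cons, if_pos hs, if_neg (by simpa using hc), pv_go_acc rest [] [cur.reverse]]
      simp [hs]
    · rw [pv_go_cons, if_neg hs, ih (c :: cur) (by simp)]
      simp [hs]

theorem pv_split₀_head (s : List Char) :
    (PySem.Chars.split₀ s).headD [] =
      (s.dropWhile PySem.Chars.isspace).takeWhile (fun c => !PySem.Chars.isspace c) := by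
  induction s with
  | nil => simp [PySem.Chars.split₀, pv_go_nil]
  | cons c rest ih =>
    by_cases hs : PySem.Chars.isspace c
    · unfold PySem.Chars.split₀ at ih ⊢
      rw [pv_go_cons, if_pos hs, if_pos List.isEmpty_nil, List.dropWhile_cons, if_pos hs]
      exact ih
    · unfold PySem.Chars.split₀
      rw [pv_go_cons, if_neg hs, List.headD_eq_head?_getD,
          pv_go_word rest [c] (by simp), List.dropWhile_cons, if_neg hs,
          List.takeWhile_cons, if_pos (by simp [hs])]
      rfl

theorem pv_decode_mem (bh : List Char) (h : bh ∈ pvCodes) :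
    pvDecode.getD bh ' ' = pvAChr bh := by
  fin_cases h <;> decide

theorem pv_decode_not_mem (bh : List Char) (h : bh ∉ pvCodes) :
    pvDecode.getD bh ' ' = ' ' := by
  have hitems : pvDecode.items =
      [(['3','0'],'0'),(['3','1'],'1'),(['3','2'],'2'),(['3','3'],'3'),(['3','4'],'4'),
       (['3','5'],'5'),(['3','6'],'6'),(['3','7'],'7'),(['3','8'],'8'),(['3','9'],'9')] := by decide
  have hfind : (pvDecode.items.find? (fun p => p.1 == bh)) = none := by
    rw [hitems]
    apply List.find?_eq_none.mpr
    intro p hp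
    fin_cases hp <;>
      · simp only [beq_iff_eq]
        intro he
        exact h (by rw [← he]; simp [pvCodes])
  simp [PySem.Dict.getD, PySem.Dict.get?, hfind]

theorem pv_digit_nonspace (bh : List Char) (h : bh ∈ pvCodes) :
    PySem.Chars.isspace (pvAChr bh) = false := by
  fin_cases h <;> decide

theorem pv_mapped_nil (h : List Char) (si : Int) (i : Int) (rest : List Int)
    (hge : (h.length : Int) ≤ si + i) (hr : ∀ j ∈ rest, i ≤ j) :
    pvMapped h si (i :: rest) = [] := by
  have : (i :: rest).filter (fun j => decide (si + j < (h.length : Int))) = [] := by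
    apply List.filter_eq_nil_iff.mpr
    intro j hj
    rcases List.mem_cons.mp hj with rfl | hj
    · simpa using not_lt.mpr hge
    · exact by simpa using not_lt.mpr (le_trans hge (by have := hr j hj; omega))
  simp [pvMapped, this]

theorem pv_take (h : List Char) (si : Int) :
    ∀ (l : List Int), l.Pairwise (· ≤ ·) → ∀ (num : List Char), num ≠ [] →
    pvALoopL h si l num = num ++ (pvMapped h si l).takeWhile (fun c => !PySem.Chars.isspace c) := by
  intro l
  induction l with
  | nil => intro _ num _; simp [pvALoopL, pvMapped]
  | cons i rest ih =>
    intro hp num hnum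
    have hrest := (List.pairwise_cons.mp hp).2
    have hhead := (List.pairwise_cons.mp hp).1
    by_cases hge : (h.length : Int) ≤ si + i
    · rw [pvALoopL, if_pos hge, pv_mapped_nil h si i rest hge hhead]
      simp
    · have hlt : si + i < (h.length : Int) := lt_of_not_ge hge
      have hm : pvMapped h si (i :: rest) =
          pvDecode.getD (PySem.List.slice h (some (si + i)) (some (si + i + 2))) ' '
            :: pvMapped h si rest := by
        simp [pvMapped, hlt]
      set bh := PySem.List.slice h (some (si + i)) (some (si + i + 2)) with hbh
      by_cases hmem : bh ∈ pvCodes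
      · rw [pvALoopL, if_neg hge]
        simp only [← hbh]
        rw [if_pos (by simpa [pvCodes] using hmem)]
        rw [ih hrest (num ++ [pvAChr bh]) (by simp)]
        rw [hm, pv_decode_mem bh hmem, List.takeWhile_cons,
            if_pos (by simp [pv_digit_nonspace bh hmem])]
        simp
      · rw [pvALoopL, if_neg hge]
        simp only [← hbh]
        rw [if_neg (by simpa [pvCodes] using hmem),
            if_pos (by cases num with | nil => exact absurd rfl hnum | cons a b => simp)]
        rw [hm, pv_decode_not_mem bh hmem, List.takeWhile_cons]
        simp [show PySem.Chars.isspace ' ' = true from rfl]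

theorem pv_skip (h : List Char) (si : Int) :
    ∀ (l : List Int), l.Pairwise (· ≤ ·) →
    pvALoopL h si l [] =
      ((pvMapped h si l).dropWhile PySem.Chars.isspace).takeWhile (fun c => !PySem.Chars.isspace c) := by
  intro l
  induction l with
  | nil => simp [pvALoopL, pvMapped]
  | cons i rest ih =>
    intro hp
    have hrest := (List.pairwise_cons.mp hp).2
    have hhead := (List.pairwise_cons.mp hp).1
    by_cases hge : (h.length : Int) ≤ si + i
    · rw [pvALoopL, if_pos hge, pv_mapped_nil h si i rest hge hhead]
      simp
    · have hlt : si + i < (h.length : Int) := lt_of_not_ge hge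
      have hm : pvMapped h si (i :: rest) =
          pvDecode.getD (PySem.List.slice h (some (si + i)) (some (si + i + 2))) ' '
            :: pvMapped h si rest := by
        simp [pvMapped, hlt]
      set bh := PySem.List.slice h (some (si + i)) (some (si + i + 2)) with hbh
      by_cases hmem : bh ∈ pvCodes
      · rw [pvALoopL, if_neg hge]
        simp only [← hbh]
        rw [if_pos (by simpa [pvCodes] using hmem)]
        simp only [List.nil_append]
        rw [pv_take h si rest hrest [pvAChr bh] (by simp)]
        rw [hm, pv_decode_mem bh hmem, List.dropWhile_cons,
            if_neg (by simp [pv_digit_nonspace bh hmem]), List.takeWhile_cons,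
            if_pos (by simp [pv_digit_nonspace bh hmem])]
        simp
      · rw [pvALoopL, if_neg hge]
        simp only [← hbh]
        rw [if_neg (by simpa [pvCodes] using hmem), if_neg (by simp)]
        rw [ih hrest, hm, pv_decode_not_mem bh hmem, List.dropWhile_cons,
            if_pos (show PySem.Chars.isspace ' ' = true from rfl)]

theorem pv_pyRange_pairwise (a b s : Int) (hs : 0 ≤ s) :
    (PySem.List.pyRange a b s).Pairwise (· ≤ ·) := by
  unfold PySem.List.pyRange
  split_ifs with h0
  · exact List.Pairwise.nil
  all_goals
    exact List.Pairwise.map _ (fun i j (hij : i < j) => by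
      have : s * (i : Int) ≤ s * (j : Int) :=
        mul_le_mul_of_nonneg_left (by exact_mod_cast le_of_lt hij) hs
      omega) (List.pairwise_lt_range)

-- ===== VERDICT (by name: the statement is the Claim_ definition above) =====
theorem extract_ascii_number_py_spec : Claim_equal_extract_ascii_number_py := by
  unfold Claim_equal_extract_ascii_number_py
  intro hex_data start_idx length _
  unfold Spec_extract_ascii_number_py extract_ascii_number_py extract_ascii_number_py_alt
  rw [pv_pvALoop_eq_L]
  rw [pv_skip hex_data.toList start_idx (PySem.List.pyRange 0 (length * 3) 3)
      (pv_pyRange_pairwise 0 (length * 3) 3 (by norm_num))]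
  simp only [pv_split₀_head]
  have hfr := pv_filter_range start_idx ((hex_data.toList.length : Int) - start_idx) (length * 3) 0
  simp only [pvMapped]
  rw [show (fun j => decide (start_idx + j < (hex_data.toList.length : Int))) =
        (fun j => decide (start_idx + j < start_idx + ((hex_data.toList.length : Int) - start_idx)))
      from by funext j; simp only [decide_eq_decide]; omega]
  rw [hfr]
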